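-- pv_equiv track=rewrite | github.com/JedeDChicken/Data_Structures_and_Algorithms | AVL Tree.py | bst_array1_insert
-- ===== SOURCE A (Python) =====
-- def bst_array1_insert(array, data):
--     if len(array) == 0:
--         array.append([data, -1, -1])
--     else:
--         current_idx = 0
--         while True:
--             if data <= array[current_idx][0]:
--                 left_child_idx = array[current_idx][1]
--                 if left_child_idx == -1:
--                     left_child_idx = len(array)
--                     array[current_idx][1] = left_child_idx
--                     array.append([data, -1, -1])
--                     break
--                 current_idx = left_child_idx
--             else:
--                 right_child_idx = array[current_idx][2]
--                 if right_child_idx == -1: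
--                     right_child_idx = len(array)
--                     array[current_idx][2] = right_child_idx
--                     array.append([data, -1, -1])
--                     break
--                 current_idx = right_child_idx
--
--     return array
-- ===== SOURCE B (Python) =====
-- def bst_array1_insert(array, data):
--     # Recursive decomposition: insert(idx) recurses on the child node instead of
--     # A's while-True loop; attach() is the one shared mutate-and-append step.
--     # Like A, mutates `array` in place and returns it.
--     def attach(idx, s):
--         array[idx][s] = len(array)
--         array.append([data, -1, -1])
--
--     def insert(idx):
--         if data <= array[idx][0]:
--             if array[idx][1] == -1:
--                 attach(idx, 1)
--             else:
--                 insert(array[idx][1])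
--         else:
--             if array[idx][2] == -1:
--                 attach(idx, 2)
--             else:
--                 insert(array[idx][2])
--
--     if len(array) == 0:
--         array.append([data, -1, -1])
--     else:
--         insert(0)
--     return array
-- ===== Notes on version B (the rewrite author's own statement) =====
-- stated objective: alternative
-- what changed: B replaces A's iterative while-True descent (with duplicated mutate-break branches and explicit child-index variables) by a recursive insert(idx) helper that recurses on the child node, with a single shared attach(idx, side) helper doing the mutation and append.
-- outside the precondition, e.g. on bst_array1_insert([[5, 4, -1]], 3): A raises IndexError, B raises IndexError
import Mathlib
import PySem

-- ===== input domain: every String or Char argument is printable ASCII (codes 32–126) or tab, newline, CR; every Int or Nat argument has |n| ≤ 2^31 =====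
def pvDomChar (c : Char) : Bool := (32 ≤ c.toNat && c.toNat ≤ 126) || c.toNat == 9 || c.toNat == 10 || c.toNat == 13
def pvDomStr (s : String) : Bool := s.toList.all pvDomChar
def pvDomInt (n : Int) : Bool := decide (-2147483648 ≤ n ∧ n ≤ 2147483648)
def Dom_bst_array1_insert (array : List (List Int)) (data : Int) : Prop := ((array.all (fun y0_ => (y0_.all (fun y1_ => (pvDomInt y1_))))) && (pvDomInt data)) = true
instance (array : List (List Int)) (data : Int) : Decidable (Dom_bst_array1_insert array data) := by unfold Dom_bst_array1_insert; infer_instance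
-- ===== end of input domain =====

-- Both A and B mutate `array` in place in Python; the equivalence proved here is about the returned value,
-- for inputs whose rows are distinct objects (if one row object occurs at two indices, Python's in-place
-- mutation updates both occurrences, which a value-level port cannot express).
-- B is an alternative decomposition: a recursive insert(idx) helper recursing on the child node, with one
-- shared attach(idx, side) mutate-and-append helper, instead of A's while-True loop with duplicated
-- mutate-and-break branches and explicit child-index variables.

-- ===== PORT A =====
-- A's while-True descent; fuel bounds the iterations (under Pre_ the descent index strictly
-- increases, so fuel = array.length never runs out).
def bstA_loop (array : List (List Int)) (data : Int) : Nat → Nat → List (List Int)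
  | _, 0 => array
  | current_idx, fuel + 1 =>
    let row := array.getD current_idx []
    if data ≤ row.getD 0 0 then
      let left_child_idx := row.getD 1 0
      if left_child_idx = -1 then
        (array.set current_idx (row.set 1 (array.length : Int))) ++ [[data, -1, -1]]
      else
        bstA_loop array data left_child_idx.toNat fuel
    else
      let right_child_idx := row.getD 2 0
      if right_child_idx = -1 then
        (array.set current_idx (row.set 2 (array.length : Int))) ++ [[data, -1, -1]]
      else
        bstA_loop array data right_child_idx.toNat fuel

def bst_array1_insert (array : List (List Int)) (data : Int) : List (List Int) :=
  if array.length = 0 then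
    array ++ [[data, -1, -1]]
  else
    bstA_loop array data 0 array.length

-- ===== PORT B =====
-- array[idx][s] in B's reads (Python IndexError ↦ default 0; Pre_ excludes those inputs)
def bstB_child (array : List (List Int)) (idx : Nat) (s : Nat) : Int :=
  (array.getD idx []).getD s 0

-- B's attach helper: array[idx][s] = len(array); array.append([data, -1, -1])
def bstB_attach (array : List (List Int)) (data : Int) (idx : Nat) (s : Nat) : List (List Int) :=
  array.modify idx (fun r => r.set s (array.length : Int)) ++ [[data, -1, -1]]

-- B's recursive insert helper (fuel makes the recursion structural; under Pre_ it never runs out)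
def bstB_insert (array : List (List Int)) (data : Int) : Nat → Nat → List (List Int)
  | 0, _ => array
  | fuel + 1, idx =>
    if data ≤ bstB_child array idx 0 then
      if bstB_child array idx 1 = -1 then bstB_attach array data idx 1
      else bstB_insert array data fuel (bstB_child array idx 1).toNat
    else
      if bstB_child array idx 2 = -1 then bstB_attach array data idx 2
      else bstB_insert array data fuel (bstB_child array idx 2).toNat

def bst_array1_insert_alt (array : List (List Int)) (data : Int) : List (List Int) :=
  if array.length = 0 then
    array ++ [[data, -1, -1]]
  else
    bstB_insert array data array.length 0

-- ===== PRECONDITION & SPEC =====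
-- Pre_ admits the empty array, arrays whose descent resolves already at the root, and arrays whose
-- every row is long enough on the side `data` descends with that child pointer -1 or strictly forward
-- and in range (the invariant of every array this function builds). It excludes malformed arrays on
-- which the Python A raises IndexError, loops forever, or wraps a negative child index around; it
-- also excludes some arrays whose malformed rows are unreachable from the descent, on which A and B
-- still return the same value (see cites). The ports themselves are totalised by fuel and default
-- reads, so the Lean equivalence below holds step for step without consulting Pre_.
def pvChildOk (n : Nat) (i : Nat) (c : Int) : Prop := c = -1 ∨ ((i : Int) < c ∧ c < (n : Int))

def pvRowOk (n : Nat) (i : Nat) (data : Int) (row : List Int) : Prop :=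
  if data ≤ row.getD 0 0 then 2 ≤ row.length ∧ pvChildOk n i (row.getD 1 0)
  else 3 ≤ row.length ∧ pvChildOk n i (row.getD 2 0)

def pvRootDone (array : List (List Int)) (data : Int) : Prop :=
  array ≠ [] ∧
    (if data ≤ (array.getD 0 []).getD 0 0 then
      2 ≤ (array.getD 0 []).length ∧ (array.getD 0 []).getD 1 0 = -1
    else
      3 ≤ (array.getD 0 []).length ∧ (array.getD 0 []).getD 2 0 = -1)

def Pre_bst_array1_insert (array : List (List Int)) (data : Int) : Prop :=
  array = [] ∨ pvRootDone array data ∨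
    ∀ i, i < array.length → pvRowOk array.length i data (array.getD i [])

instance (array : List (List Int)) (data : Int) : Decidable (Pre_bst_array1_insert array data) := by
  unfold Pre_bst_array1_insert pvRootDone pvRowOk pvChildOk
  infer_instance

def pvWitness_bst_array1_insert : List (List Int) × Int := ([[5, -1, -1]], 3)

def Spec_bst_array1_insert (array : List (List Int)) (data : Int) (out : List (List Int)) : Prop := out = bst_array1_insert_alt array data
instance (array : List (List Int)) (data : Int) (out : List (List Int)) : Decidable (Spec_bst_array1_insert array data out) := by unfold Spec_bst_array1_insert; infer_instance

-- ===== CLAIM (what is proved, stated in full; the proofs are below) =====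
def Claim_equal_bst_array1_insert : Prop := ∀ (array : List (List Int)) (data : Int), Dom_bst_array1_insert array data → Pre_bst_array1_insert array data → Spec_bst_array1_insert array data (bst_array1_insert array data)

-- ===== LEMMAS AND PROOFS =====

-- B's modify-based mutation equals A's set-based one (both are no-ops out of range)
lemma modify_set_eq (l : List (List Int)) (i s : Nat) (v : Int) :
    l.modify i (fun r => r.set s v) = l.set i ((l.getD i []).set s v) := by
  rw [List.modify_eq_set_getElem?]
  cases h : l[i]? with
  | none =>
    have : l.length ≤ i := by
      by_contra hlt
      rw [List.getElem?_eq_getElem (by omega : i < l.length)] at h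
      simp at h
    simp [List.set_eq_of_length_le this]
  | some r => simp [List.getD_eq_getElem?_getD, h]

-- A's loop and B's recursion perform identical steps
lemma loop_eq_insert (array : List (List Int)) (data : Int) :
    ∀ fuel idx, bstA_loop array data idx fuel = bstB_insert array data fuel idx := by
  intro fuel
  induction fuel with
  | zero => intro idx; rfl
  | succ fuel ih =>
    intro idx
    simp only [bstA_loop, bstB_insert, bstB_child, bstB_attach, modify_set_eq]
    split_ifs <;> first | rfl | exact ih _

-- ===== VERDICT (by name: the statement is the Claim_ definition above) =====
theorem bst_array1_insert_spec : Claim_equal_bst_array1_insert := by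
  intro array data _ _
  unfold Spec_bst_array1_insert bst_array1_insert bst_array1_insert_alt
  split_ifs with h
  · rfl
  · exact loop_eq_insert array data array.length 0
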